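-- pv_equiv track=rewrite | github.com/miliar/Code_Jam_Webscraper | Solutions_python/Problem_138/1534.py | dwar
-- ===== SOURCE A (Python) =====
-- def dwar(array1, array2):
-- 	noamis_score = 0
-- 	# for i in range(0, len(array1)):
-- 	if len(array1) == 0 or len(array2) == 0:
-- 		return noamis_score
-- 	if array1[0] > array2[0]:
-- 		# print 'entering more loop'
-- 		# print array1[i+1:]
-- 		# print array2[i+1:]
-- 		noamis_score += 1 + dwar(array1[1:], array2[1:])
-- 		# break
-- 	else:
-- 		# print 'entering less loop'
-- 		# print array1[i+1:]
-- 		# print array2[:-i-1]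
-- 		noamis_score += dwar(array1[1:], array2[:-1])
-- 	return noamis_score
-- ===== SOURCE B (Python) =====
-- def dwar(array1, array2):
--     # Two-pointer scan: lo/hi delimit the live segment of array2; no slicing.
--     score = 0
--     lo, hi = 0, len(array2) - 1
--     for v in array1:
--         if lo > hi:
--             break
--         if v > array2[lo]:
--             score += 1
--             lo += 1
--         else:
--             hi -= 1
--     return score
-- ===== Notes on version B (the rewrite author's own statement) =====
-- stated objective: faster
-- what changed: Replaces the O(n^2) recursion that copies slices of both lists at every step with a single iterative pass using two index pointers into array2 (left pointer advances on a win, right pointer retreats otherwise), no list copying.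
import Mathlib
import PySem

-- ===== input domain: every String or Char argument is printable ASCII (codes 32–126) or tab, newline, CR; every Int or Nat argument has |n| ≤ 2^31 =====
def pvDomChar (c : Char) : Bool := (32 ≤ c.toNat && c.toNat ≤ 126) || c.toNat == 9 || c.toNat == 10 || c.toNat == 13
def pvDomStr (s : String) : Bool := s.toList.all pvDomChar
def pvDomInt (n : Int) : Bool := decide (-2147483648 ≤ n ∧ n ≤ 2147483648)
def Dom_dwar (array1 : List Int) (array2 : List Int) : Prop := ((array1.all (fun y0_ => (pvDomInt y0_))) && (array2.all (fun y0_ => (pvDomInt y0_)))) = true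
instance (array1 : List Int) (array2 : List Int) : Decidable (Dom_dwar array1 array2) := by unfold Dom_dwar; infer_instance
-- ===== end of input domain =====

-- B replaces A's slice-copying recursion with one two-pointer pass over array2 (faster, asymptotic).


-- ===== PORT A =====
-- array1[1:] is List.drop 1, array2[:-1] is List.dropLast (exact for slicing one off either end).
def dwar (array1 : List Int) (array2 : List Int) : Int :=
  match array1, array2 with
  | [], _ => 0
  | _ :: _, [] => 0
  | x :: xs, y :: ys =>
      if x > y then 1 + dwar xs ys
      else dwar xs ((y :: ys).dropLast)

-- ===== PORT B =====
-- the for-loop with break: structural recursion over array1 carrying (score, lo, hi);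
-- array2[lo] is PySem.List.pyGetD (lo is always a valid nonneg index when read, since lo ≤ hi < len).
def dwarAltLoop (array2 : List Int) : List Int → Int → Int → Int → Int
  | [], score, _, _ => score
  | v :: vs, score, lo, hi =>
      if lo > hi then score
      else if v > PySem.List.pyGetD array2 lo 0 then
        dwarAltLoop array2 vs (score + 1) (lo + 1) hi
      else
        dwarAltLoop array2 vs score lo (hi - 1)

def dwar_alt (array1 : List Int) (array2 : List Int) : Int :=
  dwarAltLoop array2 array1 0 0 ((array2.length : Int) - 1)

-- ===== PRECONDITION & SPEC =====
def Spec_dwar (array1 : List Int) (array2 : List Int) (out : Int) : Prop := out = dwar_alt array1 array2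
instance (array1 : List Int) (array2 : List Int) (out : Int) : Decidable (Spec_dwar array1 array2 out) := by unfold Spec_dwar; infer_instance

-- ===== CLAIM (what is proved, stated in full; the proofs are below) =====
def Claim_equal_dwar : Prop := ∀ (array1 : List Int) (array2 : List Int), Dom_dwar array1 array2 → Spec_dwar array1 array2 (dwar array1 array2)

-- ===== LEMMAS AND PROOFS =====

theorem pyGetD_mid (pre : List Int) (y : Int) (rest : List Int) :
    PySem.List.pyGetD (pre ++ y :: rest) (pre.length : Int) 0 = y := by
  rw [PySem.List.pyGetD_natCast]
  simp [List.getD_eq_getElem?_getD]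

-- loop invariant: the live segment a2[lo..hi] is `seg`, with a2 = pre ++ seg ++ post,
-- lo = pre.length, hi = lo + seg.length - 1; then the loop adds dwar of the segment.
theorem dwarAltLoop_eq (a1 : List Int) :
    ∀ (pre seg post : List Int) (s : Int),
      dwarAltLoop (pre ++ seg ++ post) a1 s (pre.length : Int)
        ((pre.length : Int) + (seg.length : Int) - 1)
      = s + dwar a1 seg := by
  induction a1 with
  | nil => intro pre seg post s; simp [dwarAltLoop, dwar]
  | cons v vs ih =>
    intro pre seg post s
    cases seg with
    | nil =>
      simp only [dwarAltLoop]
      rw [if_pos (by simp)]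
      simp [dwar]
    | cons y ys =>
      simp only [dwarAltLoop]
      rw [if_neg (by simp only [List.length_cons]; push_cast; omega)]
      have hget : PySem.List.pyGetD (pre ++ (y :: ys) ++ post) (pre.length : Int) 0 = y := by
        rw [List.append_assoc]
        exact pyGetD_mid pre y (ys ++ post)
      rw [hget]
      by_cases hv : v > y
      · rw [if_pos hv]
        have harr : pre ++ (y :: ys) ++ post = (pre ++ [y]) ++ ys ++ post := by simp
        have := ih (pre ++ [y]) ys post (s + 1)
        rw [harr]
        have hlen : ((pre ++ [y]).length : Int) = (pre.length : Int) + 1 := by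
          simp
        rw [hlen] at this
        rw [show (pre.length : Int) + ((y :: ys).length : Int) - 1
              = (pre.length : Int) + 1 + (ys.length : Int) - 1 by push_cast [List.length_cons]; ring]
        rw [this]
        simp [dwar, hv]
        ring
      · rw [if_neg hv]
        have h2 : (y :: ys).dropLast ++ [(y :: ys).getLast (by simp)] = y :: ys :=
          List.dropLast_append_getLast (by simp)
        have harr : pre ++ (y :: ys) ++ post
            = pre ++ (y :: ys).dropLast ++ ((y :: ys).getLast (by simp) :: post) := by
          conv_lhs => rw [← h2]
          simp
        have := ih pre (y :: ys).dropLast ((y :: ys).getLast (by simp) :: post) s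
        rw [harr]
        have hl : (((y :: ys).dropLast).length : Int) = ((y :: ys).length : Int) - 1 := by
          simp [List.length_dropLast]
        rw [show (pre.length : Int) + ((y :: ys).length : Int) - 1 - 1
              = (pre.length : Int) + (((y :: ys).dropLast).length : Int) - 1 by rw [hl]; ring]
        rw [this]
        simp [dwar, hv]

-- ===== VERDICT (by name: the statement is the Claim_ definition above) =====
theorem dwar_spec : Claim_equal_dwar := by
  intro a1 a2 _
  unfold Spec_dwar dwar_alt
  simpa using (dwarAltLoop_eq a1 [] a2 [] 0).symm
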